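-- pv_equiv track=rewrite | github.com/brxxlstxrs/mpython | repetition/words_game.py | word_is_ok
-- ===== SOURCE A (Python) =====
-- def word_is_ok(word: str, source: str):
--     for char in word:
--         if char in source:
--             char_count = source.count(char)
--             source = source.replace(char, "") + char * (char_count - 1)
--         else:
--             return False
--     return True
-- ===== SOURCE B (Python) =====
-- def word_is_ok(word: str, source: str):
--     sw = sorted(word)
--     ss = sorted(source)
--     i = 0
--     j = 0
--     while i < len(sw):
--         if j == len(ss):
--             return False
--         if ss[j] < sw[i]:
--             j += 1
--         elif ss[j] == sw[i]:
--             i += 1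
--             j += 1
--         else:
--             return False
--     return True
-- ===== Notes on version B (the rewrite author's own statement) =====
-- stated objective: faster
-- what changed: Replaced the per-character scan-and-rebuild of the source string (count+replace+concat each iteration) by sorting both strings once and consuming them with a single two-pointer merge pass.
import Mathlib
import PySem

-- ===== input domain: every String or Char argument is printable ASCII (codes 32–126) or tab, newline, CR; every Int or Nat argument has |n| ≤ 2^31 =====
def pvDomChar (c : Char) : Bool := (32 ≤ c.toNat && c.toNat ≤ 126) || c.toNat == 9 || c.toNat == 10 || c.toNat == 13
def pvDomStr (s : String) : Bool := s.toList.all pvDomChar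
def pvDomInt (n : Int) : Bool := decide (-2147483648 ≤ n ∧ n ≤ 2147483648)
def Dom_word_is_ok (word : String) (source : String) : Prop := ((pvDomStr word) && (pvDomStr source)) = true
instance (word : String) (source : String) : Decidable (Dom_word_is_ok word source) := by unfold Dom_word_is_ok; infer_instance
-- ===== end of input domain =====

-- B sorts both strings once and checks sub-multiset containment with one two-pointer
-- merge pass, instead of A's per-character count/replace/rebuild of the source string.

-- ===== PORT A =====
-- the for-loop over word, with the rebuilt source string as loop state; early 'return False'
def wordIsOkGo : List Char → List Char → Bool
  | [], _ => true
  | c :: rest, src =>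
    if PySem.Chars.isIn [c] src then
      let charCount := PySem.Chars.count src [c]
      wordIsOkGo rest (PySem.Chars.replace src [c] [] ++ PySem.List.pyRepeat [c] ((charCount : Int) - 1))
    else false

def word_is_ok (word : String) (source : String) : Bool :=
  wordIsOkGo word.toList source.toList

-- ===== PORT B =====
-- the while-loop over the two sorted lists: the suffixes sw[i:], ss[j:] are the two arguments
def mergeOk : List Char → List Char → Bool
  | [], _ => true
  | _ :: _, [] => false
  | a :: w, b :: s => if b < a then mergeOk (a :: w) s else if b = a then mergeOk w s else false

def word_is_ok_alt (word : String) (source : String) : Bool :=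
  mergeOk (PySem.List.sorted word.toList (fun c => c)) (PySem.List.sorted source.toList (fun c => c))

-- ===== PRECONDITION & SPEC =====
def Spec_word_is_ok (word : String) (source : String) (out : Bool) : Prop := out = word_is_ok_alt word source
instance (word : String) (source : String) (out : Bool) : Decidable (Spec_word_is_ok word source out) := by unfold Spec_word_is_ok; infer_instance

-- ===== CLAIM (what is proved, stated in full; the proofs are below) =====
def Claim_equal_word_is_ok : Prop := ∀ (word : String) (source : String), Dom_word_is_ok word source → Spec_word_is_ok word source (word_is_ok word source)

-- ===== LEMMAS AND PROOFS =====

-- str.count with a single-character needle is List.count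
lemma count_go_singleton (c : Char) (l : List Char) (fuel acc : Nat) (h : l.length ≤ fuel) :
    PySem.Chars.count.go [c] fuel l acc = acc + l.count c := by
  induction l generalizing fuel acc with
  | nil => cases fuel <;> simp [PySem.Chars.count.go]
  | cons x t ih =>
    cases fuel with
    | zero => simp at h
    | succ fuel =>
      simp only [PySem.Chars.count.go]
      by_cases hx : x = c
      · subst hx
        simp only [List.isPrefixOf, BEq.rfl, Bool.true_and, if_true,
          List.length_singleton, List.drop_one, List.tail_cons]
        rw [ih fuel (acc + 1) (by simpa using h)]
        simp
        omega
      · have : ¬ ([c].isPrefixOf (x :: t) = true) := by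
          simp [List.isPrefixOf]
          exact fun hcx => (hx (by simpa using hcx.symm)).elim
        rw [if_neg this, ih fuel acc (by simpa using h)]
        simp [hx]

lemma count_singleton (s : List Char) (c : Char) :
    PySem.Chars.count s [c] = s.count c := by
  simp [PySem.Chars.count, count_go_singleton c s s.length 0 le_rfl]

-- str.replace of a single character by "" is List.filter
lemma replace_go_singleton (c : Char) (l acc : List Char) (fuel : Nat) (h : l.length ≤ fuel) :
    PySem.Chars.replace.go [c] [] fuel l acc = acc.reverse ++ l.filter (fun x => x ≠ c) := by
  induction l generalizing fuel acc with
  | nil => cases fuel <;> simp [PySem.Chars.replace.go]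
  | cons x t ih =>
    cases fuel with
    | zero => simp at h
    | succ fuel =>
      simp only [PySem.Chars.replace.go]
      by_cases hx : x = c
      · subst hx
        simp only [List.isPrefixOf, BEq.rfl, Bool.true_and, if_true,
          List.length_singleton, List.drop_one, List.tail_cons, List.reverse_nil, List.nil_append]
        rw [ih acc fuel (by simpa using h)]
        simp
      · have : ¬ ([c].isPrefixOf (x :: t) = true) := by
          simp [List.isPrefixOf]
          exact fun hcx => (hx (by simpa using hcx.symm)).elim
        rw [if_neg this, ih (x :: acc) fuel (by simpa using h)]
        simp [hx]

lemma replace_singleton (s : List Char) (c : Char) :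
    PySem.Chars.replace s [c] [] = s.filter (fun x => x ≠ c) := by
  simp [PySem.Chars.replace, replace_go_singleton c s [] s.length le_rfl]

-- 'char in source' for a single character is membership
lemma isIn_singleton (c : Char) (s : List Char) :
    PySem.Chars.isIn [c] s = true ↔ c ∈ s := by
  rw [PySem.Chars.isIn_iff_infix, List.singleton_infix_iff]

-- the rebuilt source of A is, as a multiset, 'erase c'
lemma rebuilt_source_eq_erase (s : List Char) (c : Char) (h : c ∈ s) :
    ((s.filter (fun x => x ≠ c) ++
        PySem.List.pyRepeat [c] (((PySem.Chars.count s [c] : Nat) : Int) - 1) : List Char) : Multiset Char)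
      = (s : Multiset Char).erase c := by
  rw [count_singleton, PySem.List.pyRepeat_singleton]
  have hc : 1 ≤ s.count c := List.one_le_count_iff.mpr h
  have htn : (((s.count c : Nat) : Int) - 1).toNat = s.count c - 1 := by omega
  rw [htn]
  ext a
  have hfil : (s.filter (fun x => x ≠ c)).count a = if a = c then 0 else s.count a := by
    by_cases hb : a = c
    · subst hb
      rw [if_pos rfl]
      exact List.count_eq_zero.mpr (by simp)
    · rw [if_neg hb, List.count_filter]
      simp [hb]
  by_cases ha : a = c
  · subst ha
    rw [Multiset.count_erase_self, Multiset.coe_count, Multiset.coe_count, List.count_append,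
      hfil, if_pos rfl]
    simp
  · rw [Multiset.count_erase_of_ne ha, Multiset.coe_count, Multiset.coe_count, List.count_append,
      hfil, if_neg ha]
    simp [List.count_replicate, Ne.symm ha]

-- cons-le characterisation used for A's loop
lemma cons_le_iff_mem_erase (c : Char) (t u : Multiset Char) :
    c ::ₘ t ≤ u ↔ c ∈ u ∧ t ≤ u.erase c := by
  constructor
  · intro hle
    have hc : c ∈ u := Multiset.mem_of_le hle (Multiset.mem_cons_self c t)
    refine ⟨hc, ?_⟩
    have := Multiset.erase_le_erase c hle
    simpa [Multiset.erase_cons_head] using this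
  · rintro ⟨hc, ht⟩
    calc c ::ₘ t ≤ c ::ₘ u.erase c := Multiset.cons_le_cons c ht
    _ = u := Multiset.cons_erase hc

-- A computes sub-multiset containment
lemma wordIsOkGo_eq (w : List Char) : ∀ s : List Char,
    wordIsOkGo w s = decide ((w : Multiset Char) ≤ (s : Multiset Char)) := by
  induction w with
  | nil => intro s; simp [wordIsOkGo]
  | cons c rest ih =>
    intro s
    by_cases h : c ∈ s
    · rw [wordIsOkGo, if_pos ((isIn_singleton c s).mpr h)]
      rw [replace_singleton, ih, rebuilt_source_eq_erase s c h, decide_eq_decide]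
      have hco : ((c :: rest : List Char) : Multiset Char) = c ::ₘ (rest : Multiset Char) := rfl
      rw [hco, cons_le_iff_mem_erase]
      exact ⟨fun ht => ⟨by simpa using h, ht⟩, fun hp => hp.2⟩
    · rw [wordIsOkGo, if_neg (by simpa [isIn_singleton] using h)]
      have : ¬ ((c :: rest : List Char) : Multiset Char) ≤ (s : Multiset Char) := by
        intro hle
        exact h (by simpa using Multiset.mem_of_le hle (by simp))
      simp [this]

-- the two-pointer merge on sorted lists computes sub-multiset containment
lemma mergeOk_eq (s : List Char) : ∀ w : List Char,
    w.Pairwise (· ≤ ·) → s.Pairwise (· ≤ ·) →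
    mergeOk w s = decide ((w : Multiset Char) ≤ (s : Multiset Char)) := by
  induction s with
  | nil =>
    intro w _ _
    cases w with
    | nil => simp [mergeOk]
    | cons a w' =>
      have : ¬ ((a :: w' : List Char) : Multiset Char) ≤ (([] : List Char) : Multiset Char) := by
        intro hle
        have hmem : a ∈ (([] : List Char) : Multiset Char) :=
          Multiset.mem_of_le hle (show a ∈ ((a :: w' : List Char) : Multiset Char) by simp)
        simp at hmem
      simp [mergeOk]
  | cons b s' ih =>
    intro w hw hs
    cases w with
    | nil => simp [mergeOk]
    | cons a w' =>
      rw [mergeOk]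
      rcases lt_trichotomy b a with hba | hba | hba
      · rw [if_pos hba]
        rw [ih (a :: w') hw hs.of_cons, decide_eq_decide]
        have hbnot : b ∉ (a :: w') := by
          intro hmem
          rcases List.mem_cons.mp hmem with h1 | h1
          · exact absurd h1 (ne_of_lt hba)
          · exact absurd (List.rel_of_pairwise_cons hw h1) (not_le.mpr hba)
        constructor
        · intro hle
          exact le_trans hle (Multiset.le_cons_self _ b)
        · intro hle
          rw [Multiset.le_iff_count] at hle ⊢
          intro x
          have hx := hle x
          rw [Multiset.coe_count, Multiset.coe_count] at hx ⊢
          rcases eq_or_ne x b with hxb | hxb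
          · have h0 : (a :: w').count x = 0 :=
              List.count_eq_zero.mpr (by rw [hxb]; exact hbnot)
            rw [h0]; exact Nat.zero_le _
          · have hbx : ¬ b = x := fun h => hxb h.symm
            have hcnt : (b :: s').count x = s'.count x := by
              simp [hbx]
            rw [hcnt] at hx
            exact hx
      · subst hba
        rw [if_neg (lt_irrefl b), if_pos rfl]
        rw [ih w' hw.of_cons hs.of_cons, decide_eq_decide]
        exact (Multiset.cons_le_cons_iff b).symm
      · rw [if_neg (not_lt.mpr (le_of_lt hba)),
          if_neg (fun h : b = a => lt_irrefl a (h ▸ hba))]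
        have hanot : a ∉ (b :: s') := by
          intro hmem
          rcases List.mem_cons.mp hmem with h1 | h1
          · exact absurd h1 (ne_of_lt hba)
          · exact absurd (List.rel_of_pairwise_cons hs h1) (not_le.mpr hba)
        have : ¬ ((a :: w' : List Char) : Multiset Char) ≤ ((b :: s' : List Char) : Multiset Char) := by
          intro hle
          have hmem : a ∈ ((b :: s' : List Char) : Multiset Char) :=
            Multiset.mem_of_le hle (show a ∈ ((a :: w' : List Char) : Multiset Char) by simp)
          exact hanot (by simpa using hmem)
        simp [this]

-- ===== VERDICT (by name: the statement is the Claim_ definition above) =====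
theorem word_is_ok_spec : Claim_equal_word_is_ok := by
  intro word source _
  unfold Spec_word_is_ok word_is_ok word_is_ok_alt
  rw [wordIsOkGo_eq,
    mergeOk_eq _ _ (PySem.List.sorted_pairwise word.toList (fun c => c))
      (PySem.List.sorted_pairwise source.toList (fun c => c)), decide_eq_decide]
  have h1 : ((PySem.List.sorted word.toList (fun c => c) : List Char) : Multiset Char)
      = (word.toList : Multiset Char) :=
    Multiset.coe_eq_coe.mpr (PySem.List.sorted_perm word.toList (fun c => c) false)
  have h2 : ((PySem.List.sorted source.toList (fun c => c) : List Char) : Multiset Char)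
      = (source.toList : Multiset Char) :=
    Multiset.coe_eq_coe.mpr (PySem.List.sorted_perm source.toList (fun c => c) false)
  rw [h1, h2]
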